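-- pv_equiv track=rewrite | github.com/aizlabs/spai | scripts/text_utils.py | filter_vocabulary_to_content
-- ===== SOURCE A (Python) =====
-- from typing import Dict
--
-- def _is_word_char(c: str) -> bool:
--     """True if c is alphanumeric or underscore (part of a token)."""
--     return len(c) == 1 and (c.isalnum() or c == "_")
--
-- def _term_at_word_boundary(content: str, start: int, term: str) -> bool:
--     """
--     True if content[start:start+len(term)] equals term and is a whole word.
--
--     Whole word: not preceded and not followed by a word character (so we do
--     not bold "tasa" inside "tasas" or "año" inside "años").
--     """
--     if not content[start:].startswith(term):
--         return False
--     end = start + len(term)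
--     if start > 0 and _is_word_char(content[start - 1]):
--         return False
--     if end < len(content) and _is_word_char(content[end]):
--         return False
--     return True
--
-- def vocabulary_term_present(content: str, term: str) -> bool:
--     """
--     Return True if term appears literally in content as a whole word or phrase.
--
--     This exact-match check is case-insensitive and works for both plain and
--     markdown-bolded terms because the surrounding `**` markers are treated as
--     non-word characters.
--     """
--     if not term:
--         return False
--
--     folded_content = content.lower()
--     folded_term = term.lower()
--     max_start = len(folded_content) - len(folded_term)
--     for start in range(max_start + 1):
--         if _term_at_word_boundary(folded_content, start, folded_term):
--             return True
--
--     return False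
--
-- def filter_vocabulary_to_content(
--     content: str,
--     vocabulary: Dict[str, str],
-- ) -> tuple[Dict[str, str], list[str]]:
--     """
--     Keep only glossary entries whose terms appear literally in content.
--
--     Returns:
--         A tuple of (filtered_vocabulary, dropped_terms).
--     """
--     filtered: Dict[str, str] = {}
--     dropped: list[str] = []
--
--     for term, gloss in vocabulary.items():
--         if vocabulary_term_present(content, term):
--             filtered[term] = gloss
--         else:
--             dropped.append(term)
--
--     return filtered, dropped
-- ===== SOURCE B (Python) =====
-- from typing import Dict
--
-- def _word_char(c: str) -> bool:
--     return c.isalnum() or c == "_"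
--
-- def vocabulary_term_present(content: str, term: str) -> bool:
--     """Whole-word presence check driven by str.find: jump from occurrence to
--     occurrence instead of testing every start index."""
--     if not term:
--         return False
--     c = content.lower()
--     t = term.lower()
--     i = c.find(t)
--     while i != -1:
--         if (i == 0 or not _word_char(c[i - 1])) and \
--            (i + len(t) == len(c) or not _word_char(c[i + len(t)])):
--             return True
--         i = c.find(t, i + 1)
--     return False
--
-- def filter_vocabulary_to_content(
--     content: str,
--     vocabulary: Dict[str, str],
-- ) -> tuple[Dict[str, str], list[str]]:
--     filtered = {term: gloss for term, gloss in vocabulary.items()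
--                 if vocabulary_term_present(content, term)}
--     dropped = [term for term in vocabulary
--                if not vocabulary_term_present(content, term)]
--     return filtered, dropped
-- ===== Notes on version B (the rewrite author's own statement) =====
-- stated objective: faster
-- what changed: The whole-word check no longer tests every start index with startswith in Python: it uses str.find to jump from occurrence to occurrence and checks boundaries only there; the single accumulator loop over the vocabulary is replaced by a dict comprehension plus a list comprehension.
import Mathlib
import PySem

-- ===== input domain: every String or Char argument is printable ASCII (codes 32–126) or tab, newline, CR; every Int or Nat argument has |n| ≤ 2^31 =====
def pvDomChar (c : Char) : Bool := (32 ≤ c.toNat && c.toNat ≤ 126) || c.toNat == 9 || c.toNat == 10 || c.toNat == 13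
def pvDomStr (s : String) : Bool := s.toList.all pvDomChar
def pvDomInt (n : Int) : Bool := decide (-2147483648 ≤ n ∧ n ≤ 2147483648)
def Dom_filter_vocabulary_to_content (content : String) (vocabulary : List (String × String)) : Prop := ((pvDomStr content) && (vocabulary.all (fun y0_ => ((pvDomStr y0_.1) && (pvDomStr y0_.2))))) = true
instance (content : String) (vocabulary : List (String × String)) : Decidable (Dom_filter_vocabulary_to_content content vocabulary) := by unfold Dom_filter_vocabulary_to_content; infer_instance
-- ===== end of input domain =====

-- B replaces the per-index startswith scan by a str.find-driven occurrence jump (measurably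
-- faster in Python) and the accumulator loop by two comprehensions.


-- ===== PORT A =====
-- _is_word_char: the `len(c) == 1` test is trivially true for a single Char
def pvA_is_word_char (c : Char) : Bool := PySem.Chars.isalnum c || c == '_'

-- _term_at_word_boundary; content[start-1] and content[end] are guarded and in range at
-- every call site (start ≤ |content| from the startswith test), so List.getD is exact there
def pvA_term_at_word_boundary (content : List Char) (start : Nat) (term : List Char) : Bool :=
  if !(PySem.Chars.startswith (content.drop start) term) then false
  else
    let e := start + term.length
    if start > 0 && pvA_is_word_char (content.getD (start - 1) ' ') then false
    else if e < content.length && pvA_is_word_char (content.getD e ' ') then false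
    else true

def pvA_vocabulary_term_present (content term : String) : Bool :=
  if term.toList.isEmpty then false
  else
    let fc := PySem.Chars.lower content.toList
    let ft := PySem.Chars.lower term.toList
    -- range(max_start + 1) with max_start = len(fc) - len(ft); empty when negative
    (List.range (fc.length + 1 - ft.length)).any (fun start => pvA_term_at_word_boundary fc start ft)

def filter_vocabulary_to_content (content : String) (vocabulary : List (String × String)) : (List (String × String)) × List String :=
  let r := vocabulary.foldl
    (fun acc p =>
      if pvA_vocabulary_term_present content p.1 then (acc.1.insert p.1 p.2, acc.2)
      else (acc.1, acc.2 ++ [p.1]))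
    ((PySem.Dict.empty : PySem.Dict String String), ([] : List String))
  (r.1.items, r.2)

-- ===== PORT B =====
def pvB_word_char (c : Char) : Bool := PySem.Chars.isalnum c || c == '_'

-- the `while i != -1` loop; i strictly increases by ≥ 1 each round, so |c| + 1 fuel is enough;
-- c[i-1] and c[i+len(t)] are guarded and in range (i is a find result), so List.getD is exact
def pvB_scan (c t : List Char) (i : Int) : Nat → Bool
  | 0 => false
  | fuel + 1 =>
    if i = -1 then false
    else if ((i == 0) || !pvB_word_char (c.getD (i.toNat - 1) ' '))
         && ((i + (t.length : Int) == (c.length : Int)) || !pvB_word_char (c.getD (i.toNat + t.length) ' ')) then true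
    else pvB_scan c t (PySem.Chars.findFrom c t (i + 1) none) fuel

def pvB_vocabulary_term_present (content term : String) : Bool :=
  if term.toList.isEmpty then false
  else
    let c := PySem.Chars.lower content.toList
    let t := PySem.Chars.lower term.toList
    pvB_scan c t (PySem.Chars.find c t) (c.length + 1)

def filter_vocabulary_to_content_alt (content : String) (vocabulary : List (String × String)) : (List (String × String)) × List String :=
  (((vocabulary.filter (fun p => pvB_vocabulary_term_present content p.1)).foldl
      (fun d p => d.insert p.1 p.2) (PySem.Dict.empty : PySem.Dict String String)).items,
   (vocabulary.filter (fun p => !pvB_vocabulary_term_present content p.1)).map (·.1))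

-- ===== PRECONDITION & SPEC =====
def Spec_filter_vocabulary_to_content (content : String) (vocabulary : List (String × String)) (out : (List (String × String)) × List String) : Prop := out = filter_vocabulary_to_content_alt content vocabulary
instance (content : String) (vocabulary : List (String × String)) (out : (List (String × String)) × List String) : Decidable (Spec_filter_vocabulary_to_content content vocabulary out) := by unfold Spec_filter_vocabulary_to_content; infer_instance

-- ===== CLAIM (what is proved, stated in full; the proofs are below) =====
def Claim_equal_filter_vocabulary_to_content : Prop := ∀ (content : String) (vocabulary : List (String × String)), Dom_filter_vocabulary_to_content content vocabulary → Spec_filter_vocabulary_to_content content vocabulary (filter_vocabulary_to_content content vocabulary)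

-- ===== LEMMAS AND PROOFS =====

-- the common "whole-word occurrence at s" condition both programs test
def pvOcc (c t : List Char) (s : Nat) : Bool :=
  decide (t <+: c.drop s)
  && ((s == 0) || !pvA_is_word_char (c.getD (s - 1) ' '))
  && ((s + t.length == c.length) || !pvA_is_word_char (c.getD (s + t.length) ' '))

lemma pvA_tawb_iff (c t : List Char) (ht : t ≠ []) (s : Nat) :
    pvA_term_at_word_boundary c s t = true ↔ pvOcc c t s = true := by
  unfold pvA_term_at_word_boundary pvOcc
  by_cases hp : t <+: c.drop s
  · have hsw : PySem.Chars.startswith (c.drop s) t = true := (PySem.Chars.startswith_iff _ _).mpr hp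
    have htl : 0 < t.length := List.length_pos_of_ne_nil ht
    have hlen : s + t.length ≤ c.length := by
      have h1 := hp.length_le
      simp only [List.length_drop] at h1
      omega
    cases hw1 : pvA_is_word_char ((getElem? c (s - 1)).getD ' ') <;>
    cases hw2 : pvA_is_word_char ((getElem? c (s + t.length)).getD ' ') <;>
      simp [List.getD, hw1, hw2, hp] <;> simp [hsw] <;> omega
  · have hsw : PySem.Chars.startswith (c.drop s) t = false := by
      rw [← Bool.not_eq_true]; rw [PySem.Chars.startswith_iff]; exact hp
    simp [hsw, hp]

lemma pvA_any_iff (c t : List Char) (ht : t ≠ []) :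
    ((List.range (c.length + 1 - t.length)).any (fun s => pvA_term_at_word_boundary c s t) = true)
      ↔ ∃ s, pvOcc c t s = true := by
  rw [List.any_eq_true]
  constructor
  · rintro ⟨s, -, hs⟩
    exact ⟨s, (pvA_tawb_iff c t ht s).mp hs⟩
  · rintro ⟨s, hs⟩
    refine ⟨s, List.mem_range.mpr ?_, (pvA_tawb_iff c t ht s).mpr hs⟩
    have hp : t <+: c.drop s := by
      have := hs
      unfold pvOcc at this
      simp only [Bool.and_eq_true, decide_eq_true_eq] at this
      exact this.1.1
    have htl : 0 < t.length := List.length_pos_of_ne_nil ht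
    have h1 := hp.length_le
    simp only [List.length_drop] at h1
    omega

lemma pvB_scan_iff (c t : List Char) (ht : t ≠ []) :
    ∀ (fuel k : Nat), k ≤ c.length → c.length + 1 - k ≤ fuel →
      (pvB_scan c t (PySem.Chars.findFrom c t (k : Int) none) fuel = true
        ↔ ∃ s, k ≤ s ∧ pvOcc c t s = true) := by
  have htl : 0 < t.length := List.length_pos_of_ne_nil ht
  intro fuel
  induction fuel with
  | zero => intro k hk hf; omega
  | succ fuel ih =>
    intro k hk hf
    by_cases hneg : PySem.Chars.findFrom c t (k : Int) none = -1
    · rw [hneg]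
      have hsc : pvB_scan c t (-1) (fuel + 1) = false := by simp [pvB_scan]
      rw [hsc]
      simp only [Bool.false_eq_true, false_iff, not_exists]
      intro s hss
      obtain ⟨hks, hs⟩ := hss
      have hnin := (PySem.Chars.findFrom_natCast_eq_neg_one_iff c t k hk).mp hneg
      have hp : t <+: c.drop s := by
        unfold pvOcc at hs
        simp only [Bool.and_eq_true, decide_eq_true_eq] at hs
        exact hs.1.1
      have hdd : List.drop (s - k) (List.drop k c) = List.drop s c := by
        rw [List.drop_drop]; congr 1; omega
      rw [← hdd] at hp
      exact hnin (hp.isInfix.trans (List.drop_suffix (s - k) (c.drop k)).isInfix)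
    · obtain ⟨hki, hpre, hmin⟩ := PySem.Chars.findFrom_natCast_spec c t k hk hneg
      set i := PySem.Chars.findFrom c t (k : Int) none with hi
      have h0 : (0 : Int) ≤ i := le_trans (by positivity) hki
      have his : i = (i.toNat : Int) := by omega
      set s0 := i.toNat with hs0
      have hs0k : k ≤ s0 := by omega
      have hs0len : s0 + t.length ≤ c.length := by
        have h1 := hpre.length_le
        simp only [List.length_drop] at h1
        omega
      have e1 : ((i == 0) : Bool) = (s0 == 0) := by
        apply Bool.eq_iff_iff.mpr
        simp only [beq_iff_eq]
        omega
      have e2 : ((i + (t.length : Int) == (c.length : Int)) : Bool) = (s0 + t.length == c.length) := by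
        apply Bool.eq_iff_iff.mpr
        simp only [beq_iff_eq]
        omega
      have hocc_eq : pvOcc c t s0
          = (((i == 0) || !pvB_word_char (c.getD (i.toNat - 1) ' '))
             && ((i + (t.length : Int) == (c.length : Int)) || !pvB_word_char (c.getD (i.toNat + t.length) ' '))) := by
        unfold pvOcc pvA_is_word_char pvB_word_char
        rw [e1, e2]
        simp only [← hs0, hpre, decide_true, Bool.true_and]
      rw [pvB_scan, if_neg hneg]
      by_cases hb : pvOcc c t s0 = true
      · rw [hocc_eq] at hb
        rw [if_pos hb]
        simp only [true_iff]
        exact ⟨s0, hs0k, by rw [hocc_eq]; exact hb⟩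
      · rw [hocc_eq] at hb
        rw [if_neg hb]
        have hcast : i + 1 = ((s0 + 1 : Nat) : Int) := by omega
        rw [hcast]
        rw [ih (s0 + 1) (by omega) (by omega)]
        constructor
        · rintro ⟨s, hss, hocc⟩; exact ⟨s, by omega, hocc⟩
        · rintro ⟨s, hks, hocc⟩
          refine ⟨s, ?_, hocc⟩
          rcases Nat.lt_trichotomy s s0 with h | h | h
          · exfalso
            have hp : t <+: c.drop s := by
              unfold pvOcc at hocc
              simp only [Bool.and_eq_true, decide_eq_true_eq] at hocc
              exact hocc.1.1
            exact hmin s hks h hp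
          · exfalso; rw [h] at hocc; rw [hocc_eq] at hocc; exact hb hocc
          · omega

lemma pv_present_eq (content term : String) :
    pvA_vocabulary_term_present content term = pvB_vocabulary_term_present content term := by
  unfold pvA_vocabulary_term_present pvB_vocabulary_term_present
  by_cases he : term.toList.isEmpty
  · simp [he]
  · rw [if_neg (by simpa using he), if_neg (by simpa using he)]
    set c := PySem.Chars.lower content.toList with hc
    set t := PySem.Chars.lower term.toList with htdef
    have ht : t ≠ [] := by
      rw [htdef]
      unfold PySem.Chars.lower
      simp only [ne_eq, List.map_eq_nil_iff]
      simpa [List.isEmpty_iff] using he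
    apply Bool.eq_iff_iff.mpr
    rw [pvA_any_iff c t ht]
    simp only []
    rw [← PySem.Chars.findFrom_zero c t]
    rw [show ((0:Int) = ((0:Nat):Int)) from rfl]
    rw [pvB_scan_iff c t ht (c.length + 1) 0 (by omega) (by omega)]
    simp

lemma pv_fold_split (pred : String → Bool) (l : List (String × String)) (d : PySem.Dict String String) (dr : List String) :
    l.foldl (fun acc p => if pred p.1 then (acc.1.insert p.1 p.2, acc.2) else (acc.1, acc.2 ++ [p.1])) (d, dr)
      = ((l.filter (fun p => pred p.1)).foldl (fun d p => d.insert p.1 p.2) d,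
         dr ++ (l.filter (fun p => !pred p.1)).map (·.1)) := by
  induction l generalizing d dr with
  | nil => simp
  | cons a l ih =>
    by_cases h : pred a.1 = true
    · simp [h, ih]
    · simp [h, ih]

-- ===== VERDICT (by name: the statement is the Claim_ definition above) =====
theorem filter_vocabulary_to_content_spec : Claim_equal_filter_vocabulary_to_content := by
  intro content vocabulary _
  unfold Spec_filter_vocabulary_to_content filter_vocabulary_to_content filter_vocabulary_to_content_alt
  simp only [pv_present_eq, pv_fold_split (pvB_vocabulary_term_present content), List.nil_append]
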